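-- pv_equiv track=rewrite | github.com/peckhams/topoflow36 | topoflow/utils/collate_basins.py | replace_periods
-- ===== SOURCE A (Python) =====
-- def replace_periods( name, new_char='' ):
--
--     #----------------------------------------------------------
--     # Note: This function replaces periods "." in a string
--     #       except when they are within a decimal number.
--     #       It uses "finditer" in the re module.
--     #----------------------------------------------------------
--     # e.g. SALT RIVER NEAR CHRYSOTILE, ARIZ. MILE 34.8 -> 348
--     # if we use: name = name.replace('.','')
--     #----------------------------------------------------------
--     # Something like this could also work:
--     # re.sub('\.(?!\s|\d|$)', '', text)
--     # return text
--     #----------------------------------------------------------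
--     char_list  = list( name )
--     char_list2 = list()
--     n = len(char_list)
--
--     for k in range(n):
--         char = char_list[k]
--         if (char == '.'):
--             char_L = char_list[k-1] if (k > 0)   else ''
--             char_R = char_list[k+1] if (k < n-1) else ''
--             if not(char_L.isnumeric() and char_R.isnumeric()):
--                char = new_char
--         char_list2.append( char )
--
--     name = "".join(char_list2)
--     return name
-- ===== SOURCE B (Python) =====
-- def replace_periods(name, new_char=''):
--     # Segment-boundary reconstruction: split on the period, then rejoin, keeping
--     # the period only between a numeric segment end and a numeric segment start.
--     segs = name.split('.')
--     out = [segs[0]]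
--     prev = segs[0]
--     for seg in segs[1:]:
--         if prev and seg and prev[-1].isnumeric() and seg[0].isnumeric():
--             out.append('.')
--         else:
--             out.append(new_char)
--         out.append(seg)
--         prev = seg
--     return ''.join(out)
-- ===== Notes on version B (the rewrite author's own statement) =====
-- stated objective: faster
-- what changed: Replaces the per-character index loop with neighbor lookups by a split-on-period segment reconstruction that decides each boundary from the adjacent segments' edge characters (C-level str.split/join instead of a Python char loop).
import Mathlib
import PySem

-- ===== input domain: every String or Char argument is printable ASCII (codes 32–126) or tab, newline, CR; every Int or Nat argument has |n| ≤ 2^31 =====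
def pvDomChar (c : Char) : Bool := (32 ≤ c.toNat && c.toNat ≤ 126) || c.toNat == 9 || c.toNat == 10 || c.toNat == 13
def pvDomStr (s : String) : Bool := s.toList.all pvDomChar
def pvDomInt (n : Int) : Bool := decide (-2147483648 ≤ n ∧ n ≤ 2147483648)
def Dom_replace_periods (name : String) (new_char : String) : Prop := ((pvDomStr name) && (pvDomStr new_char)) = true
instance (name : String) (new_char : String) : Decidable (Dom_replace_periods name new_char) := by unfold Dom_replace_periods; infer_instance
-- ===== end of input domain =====

-- ===== PORT A =====
-- B replaces A's per-character index loop (neighbor lookups at k-1/k+1) by a split-on-period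
-- segment reconstruction; same return value, measurably faster in Python (C-level split/join).
-- Python's str.isnumeric() is ported as PySem.Chars.strIsdigit: exact on the ASCII domain.
-- Loop body of A's 'for k in range(n)': char_list[k], with char_L/char_R neighbor guards.
def pvAPiece (charList : List Char) (n : Nat) (nc : List Char) (k : Nat) : List Char :=
  let char := [charList.getD k ' ']
  if char = ['.'] then
    let charL := if 0 < k then [charList.getD (k - 1) ' '] else []
    let charR := if k < n - 1 then [charList.getD (k + 1) ' '] else []
    if !(PySem.Chars.strIsdigit charL && PySem.Chars.strIsdigit charR) then nc else char
  else char

def replace_periods (name : String) (new_char : String) : String :=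
  let charList := name.toList
  let n := charList.length
  let charList2 : List (List Char) :=
    (List.range n).foldl (fun acc k => acc ++ [pvAPiece charList n new_char.toList k]) []
  String.ofList (PySem.Chars.join [] charList2)

-- ===== PORT B =====
-- name.split with the one-char period separator (exact: Python's split with nonempty sep).
def pvSplitDot : List Char -> List (List Char)
  | [] => [[]]
  | c :: rest =>
    if c = '.' then [] :: pvSplitDot rest
    else
      match pvSplitDot rest with
      | h :: t => (c :: h) :: t
      | [] => [[c]]

-- 'seg and seg[0].isnumeric()' / 'prev and prev[-1].isnumeric()' (ASCII-exact via isdigit)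
def pvHeadDig (seg : List Char) : Bool :=
  match seg.head? with
  | some c => PySem.Chars.isdigit c
  | none => false

def pvLastDig (seg : List Char) : Bool :=
  match seg.getLast? with
  | some c => PySem.Chars.isdigit c
  | none => false

def replace_periods_alt (name : String) (new_char : String) : String :=
  match pvSplitDot name.toList with
  | [] => ""  -- unreachable: split always returns at least one segment
  | s0 :: rest =>
    let r := rest.foldl
      (fun (st : List Char × List Char) seg =>
        let sep := if pvLastDig st.2 && pvHeadDig seg then ['.'] else new_char.toList
        (st.1 ++ sep ++ seg, seg))
      (s0, s0)
    String.ofList r.1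

-- ===== PRECONDITION & SPEC =====
def Spec_replace_periods (name : String) (new_char : String) (out : String) : Prop := out = replace_periods_alt name new_char
instance (name : String) (new_char : String) (out : String) : Decidable (Spec_replace_periods name new_char out) := by unfold Spec_replace_periods; infer_instance

-- ===== CLAIM (what is proved, stated in full; the proofs are below) =====
def Claim_equal_replace_periods : Prop := ∀ (name : String) (new_char : String), Dom_replace_periods name new_char → Spec_replace_periods name new_char (replace_periods name new_char)

-- ===== LEMMAS AND PROOFS =====

-- Common reference: the pieces emitted left to right; pd = "previous char is a digit".
def pvEmits (nc : List Char) : Bool → List Char → List (List Char)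
  | _, [] => []
  | pd, c :: rest =>
    (if c = '.' then (if pd && pvHeadDig rest then ['.'] else nc) else [c])
      :: pvEmits nc (PySem.Chars.isdigit c) rest

-- A's loop body, generalized over what stands left of position 0.
def pvAPieceAux (pL : List Char) (cs : List Char) (nc : List Char) (k : Nat) : List Char :=
  let char := [cs.getD k ' ']
  if char = ['.'] then
    let charL := if 0 < k then [cs.getD (k - 1) ' '] else pL
    let charR := if k < cs.length - 1 then [cs.getD (k + 1) ' '] else []
    if !(PySem.Chars.strIsdigit charL && PySem.Chars.strIsdigit charR) then nc else char
  else char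

-- B's rebuild of the tail segments, carrying the previous segment.
def pvRebuild (nc : List Char) : List Char → List (List Char) → List Char
  | _, [] => []
  | prev, seg :: rest =>
    (if pvLastDig prev && pvHeadDig seg then ['.'] else nc) ++ seg ++ pvRebuild nc seg rest

lemma pvAPieceAux_succ (pL c cs nc k) :
    pvAPieceAux pL (c :: cs) nc (k + 1) = pvAPieceAux [c] cs nc k := by
  cases k with
  | zero => simp [pvAPieceAux]
  | succ m =>
    simp only [pvAPieceAux, List.getD_cons_succ, Nat.add_sub_cancel, List.length_cons]
    simp [show (m + 1 + 1 < cs.length) = (m + 1 < cs.length - 1) from by apply propext; omega]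

lemma pvAPieceAux_zero (pL c cs nc) :
    pvAPieceAux pL (c :: cs) nc 0 =
      (if c = '.' then (if PySem.Chars.strIsdigit pL && pvHeadDig cs then ['.'] else nc)
       else [c]) := by
  cases cs with
  | nil => simp [pvAPieceAux, pvHeadDig, PySem.Chars.strIsdigit]
  | cons d rest =>
    simp only [pvAPieceAux, pvHeadDig, List.length_cons, List.getD]
    by_cases hc : c = '.' <;>
      simp [hc, PySem.Chars.strIsdigit]
    split_ifs with h1 h2 h3
    · exfalso
      obtain ⟨⟨hne, hall⟩, hd⟩ := h2
      rcases h1 with (h1 | ⟨x, hx, hxf⟩) | h1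
      · exact hne h1
      · rw [hall x hx] at hxf; simp at hxf
      · rw [hd] at h1; simp at h1
    · rfl
    · rfl
    · exfalso
      by_cases hne : pL = []
      · exact h1 (Or.inl (Or.inl hne))
      · by_cases hd : PySem.Chars.isdigit d = true
        · refine h3 ⟨⟨hne, fun x hx => ?_⟩, hd⟩
          by_contra hxf
          exact h1 (Or.inl (Or.inr ⟨x, hx, by simpa using hxf⟩))
        · exact h1 (Or.inr (by simpa using hd))

lemma pvMapA (cs : List Char) : ∀ (pL nc : List Char),
    (List.range cs.length).map (pvAPieceAux pL cs nc)
      = pvEmits nc (PySem.Chars.strIsdigit pL) cs := by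
  induction cs with
  | nil => intro pL nc; simp [pvEmits]
  | cons c rest ih =>
    intro pL nc
    rw [List.length_cons, List.range_succ_eq_map, List.map_cons, List.map_map]
    have h1 : pvAPieceAux pL (c :: rest) nc ∘ (· + 1) = pvAPieceAux [c] rest nc := by
      funext k; exact pvAPieceAux_succ pL c rest nc k
    rw [h1, ih [c] nc, pvAPieceAux_zero]
    simp [pvEmits, PySem.Chars.strIsdigit, PySem.Chars.isdigit]

lemma pvJoinNilFlatten (parts : List (List Char)) :
    PySem.Chars.join [] parts = parts.flatten := by
  induction parts with
  | nil => rfl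
  | cons p ps ih =>
    cases ps with
    | nil => simp [PySem.Chars.join, List.intercalate]
    | cons q qs =>
      rw [PySem.Chars.join_cons_cons, ih]
      simp

lemma pvA_eq (name nc : String) :
    replace_periods name nc
      = String.ofList ((pvEmits nc.toList false name.toList).flatten) := by
  unfold replace_periods
  dsimp only
  rw [PySem.List.foldl_append_singleton_eq_map]
  have h1 : pvAPiece name.toList name.toList.length nc.toList = pvAPieceAux [] name.toList nc.toList := by
    funext k; rfl
  rw [h1, pvMapA, pvJoinNilFlatten]
  rfl

lemma pvFoldB (nc : List Char) : ∀ (rest : List (List Char)) (acc prev : List Char),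
    (rest.foldl
      (fun (st : List Char × List Char) seg =>
        let sep := if pvLastDig st.2 && pvHeadDig seg then ['.'] else nc
        (st.1 ++ sep ++ seg, seg)) (acc, prev)).1
      = acc ++ pvRebuild nc prev rest := by
  intro rest
  induction rest with
  | nil => intro acc prev; simp [pvRebuild]
  | cons seg rest ih =>
    intro acc prev
    simp only [List.foldl_cons, pvRebuild, ih]
    simp

lemma pvSplitDot_eq_cons (cs : List Char) : ∃ h t, pvSplitDot cs = h :: t := by
  cases cs with
  | nil => exact ⟨[], [], rfl⟩
  | cons c rest =>
    by_cases hc : c = '.'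
    · exact ⟨[], pvSplitDot rest, by simp [pvSplitDot, hc]⟩
    · obtain ⟨h, t, hht⟩ := pvSplitDot_eq_cons rest
      exact ⟨c :: h, t, by simp [pvSplitDot, hc, hht]⟩

lemma pvHeadDig_headI (cs : List Char) :
    pvHeadDig (pvSplitDot cs).headI = pvHeadDig cs := by
  cases cs with
  | nil => rfl
  | cons c rest =>
    by_cases hc : c = '.'
    · simp [pvSplitDot, hc, pvHeadDig, PySem.Chars.isdigit]
    · obtain ⟨h, t, hht⟩ := pvSplitDot_eq_cons rest
      simp [pvSplitDot, hc, hht, pvHeadDig]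

lemma pvLastDig_concat (pseg : List Char) (c : Char) :
    pvLastDig (pseg ++ [c]) = PySem.Chars.isdigit c := by
  simp [pvLastDig]

lemma pvM (nc : List Char) : ∀ (cs pseg : List Char),
    (pvSplitDot cs).headI
        ++ pvRebuild nc (pseg ++ (pvSplitDot cs).headI) (pvSplitDot cs).tail
      = (pvEmits nc (pvLastDig pseg) cs).flatten := by
  intro cs
  induction cs with
  | nil => intro pseg; simp [pvSplitDot, pvRebuild, pvEmits]
  | cons c rest ih =>
    intro pseg
    obtain ⟨h, t, hht⟩ := pvSplitDot_eq_cons rest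
    by_cases hc : c = '.'
    · subst hc
      have ihh := ih []
      rw [hht] at ihh
      simp only [List.headI, List.tail_cons, List.nil_append] at ihh
      simp only [pvLastDig, List.getLast?_nil] at ihh
      have hhd : pvHeadDig h = pvHeadDig rest := by
        have := pvHeadDig_headI rest; rw [hht] at this; exact this
      rw [show pvSplitDot ('.' :: rest) = [] :: pvSplitDot rest from by simp [pvSplitDot], hht]
      simp only [List.headI, List.tail_cons, List.append_nil, List.nil_append, pvRebuild,
        pvEmits, List.flatten_cons, hhd]
      simp [PySem.Chars.isdigit, List.append_assoc, ihh]
    · have ihh := ih (pseg ++ [c])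
      rw [hht] at ihh
      simp only [List.headI, List.tail_cons] at ihh
      rw [pvLastDig_concat] at ihh
      rw [show pvSplitDot (c :: rest) = (c :: h) :: t from by simp [pvSplitDot, hc, hht]]
      simp only [List.headI, List.tail_cons, pvEmits, List.flatten_cons]
      rw [show pseg ++ (c :: h) = (pseg ++ [c]) ++ h from by simp,
        show ((c :: h) : List Char) ++ pvRebuild nc ((pseg ++ [c]) ++ h) t
            = c :: (h ++ pvRebuild nc ((pseg ++ [c]) ++ h) t) from by simp]
      rw [ihh]
      simp [hc]

lemma pvB_eq (name nc : String) :
    replace_periods_alt name nc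
      = String.ofList ((pvEmits nc.toList false name.toList).flatten) := by
  unfold replace_periods_alt
  obtain ⟨s0, rest, hsr⟩ := pvSplitDot_eq_cons name.toList
  have hm := pvM nc.toList name.toList []
  rw [hsr] at hm ⊢
  simp only [List.headI, List.tail, List.nil_append] at hm
  simp only [pvFoldB]
  simp only [pvLastDig, List.getLast?_nil] at hm
  rw [hm]

-- ===== VERDICT (by name: the statement is the Claim_ definition above) =====
theorem replace_periods_spec : Claim_equal_replace_periods := by
  intro name new_char _
  unfold Spec_replace_periods
  rw [pvA_eq, pvB_eq]
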